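-- pv_equiv track=rewrite | github.com/NNDSrinivas/autonomous-engineering-platform | backend/agent/tools/run_command.py | _is_node_command
-- ===== SOURCE A (Python) =====
-- def _is_node_command(command: str) -> bool:
--     """Check if command requires Node.js environment."""
--     node_commands = [
--         "npm", "npx", "node", "yarn", "pnpm", "bun",
--         "tsc", "tsx", "ts-node",
--         "jest", "vitest", "mocha",
--         "webpack", "vite", "esbuild", "rollup", "parcel",
--         "eslint", "prettier", "next", "nuxt", "gatsby",
--     ]
--     cmd_parts = command.split()
--     if not cmd_parts:
--         return False
--     first_cmd = cmd_parts[0]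
--     return any(first_cmd == nc or first_cmd.endswith(f"/{nc}") for nc in node_commands)
-- ===== SOURCE B (Python) =====
-- NODE_COMMANDS = frozenset({
--     "npm", "npx", "node", "yarn", "pnpm", "bun",
--     "tsc", "tsx", "ts-node",
--     "jest", "vitest", "mocha",
--     "webpack", "vite", "esbuild", "rollup", "parcel",
--     "eslint", "prettier", "next", "nuxt", "gatsby",
-- })
--
--
-- def _is_node_command(command: str) -> bool:
--     """Check if command requires Node.js environment."""
--     cmd_parts = command.split()
--     if not cmd_parts:
--         return False
--     base = cmd_parts[0].rsplit("/", 1)[-1]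
--     return base in NODE_COMMANDS
-- ===== Notes on version B (the rewrite author's own statement) =====
-- stated objective: simpler
-- what changed: Instead of scanning the 21-name list with an equality-or-suffix test per name, B normalizes the first token to its final path component once (via rsplit with maxsplit 1) and does a single frozenset membership test.
import Mathlib
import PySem

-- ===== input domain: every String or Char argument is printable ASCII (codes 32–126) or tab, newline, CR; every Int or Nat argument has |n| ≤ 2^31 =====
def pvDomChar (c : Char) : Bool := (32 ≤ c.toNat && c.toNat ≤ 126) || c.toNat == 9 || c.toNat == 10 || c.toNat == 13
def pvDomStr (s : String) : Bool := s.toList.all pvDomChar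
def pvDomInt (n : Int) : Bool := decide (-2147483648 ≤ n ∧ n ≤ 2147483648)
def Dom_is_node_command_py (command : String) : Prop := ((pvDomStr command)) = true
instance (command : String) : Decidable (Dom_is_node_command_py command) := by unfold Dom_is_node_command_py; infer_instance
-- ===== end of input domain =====

-- B normalizes the first token to its final path component once and does a single set-membership test, instead of A's scan over the command list with an equality-or-suffix test per name (objective: simpler).


-- ===== PORT A =====
def nodeCommandsA : List String :=
  ["npm", "npx", "node", "yarn", "pnpm", "bun",
   "tsc", "tsx", "ts-node",
   "jest", "vitest", "mocha",
   "webpack", "vite", "esbuild", "rollup", "parcel",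
   "eslint", "prettier", "next", "nuxt", "gatsby"]

def is_node_command_py (command : String) : Bool :=
  let cmd_parts := PySem.Str.split₀ command
  match cmd_parts with
  | [] => false
  | first_cmd :: _ =>
      nodeCommandsA.any (fun nc => first_cmd == nc || PySem.Str.endswith first_cmd ("/" ++ nc))

-- ===== PORT B =====
def nodeCommandsB : List String :=
  ["npm", "npx", "node", "yarn", "pnpm", "bun",
   "tsc", "tsx", "ts-node",
   "jest", "vitest", "mocha",
   "webpack", "vite", "esbuild", "rollup", "parcel",
   "eslint", "prettier", "next", "nuxt", "gatsby"]

def nodeCommandsSet : PySem.Set String := PySem.Set.ofList nodeCommandsB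

-- hand port of s.rsplit("/", 1) for the single-character separator "/" (PySem has no rsplit);
-- exact: splits off the part after the LAST '/', or returns [s] when no '/' occurs.
def rsplitSlash1 (cs : List Char) : List (List Char) :=
  match cs.reverse.dropWhile (· ≠ '/') with
  | [] => [cs]
  | _ :: before => [before.reverse, (cs.reverse.takeWhile (· ≠ '/')).reverse]

def is_node_command_py_alt (command : String) : Bool :=
  match PySem.Str.split₀ command with
  | [] => false
  | first_cmd :: _ =>
      let base := String.ofList ((rsplitSlash1 first_cmd.toList).getLastD [])
      PySem.Set.contains nodeCommandsSet base

-- ===== PRECONDITION & SPEC =====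
def Spec_is_node_command_py (command : String) (out : Bool) : Prop := out = is_node_command_py_alt command
instance (command : String) (out : Bool) : Decidable (Spec_is_node_command_py command out) := by unfold Spec_is_node_command_py; infer_instance

-- ===== CLAIM (what is proved, stated in full; the proofs are below) =====
def Claim_equal_is_node_command_py : Prop := ∀ (command : String), Dom_is_node_command_py command → Spec_is_node_command_py command (is_node_command_py command)

-- ===== LEMMAS AND PROOFS =====

-- B's basename is "reverse, take up to the first '/', reverse back"
lemma rsplitSlash1_getLastD (cs : List Char) :
    (rsplitSlash1 cs).getLastD [] = (cs.reverse.takeWhile (· ≠ '/')).reverse := by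
  unfold rsplitSlash1
  cases h : cs.reverse.dropWhile (· ≠ '/') with
  | nil =>
      have hsplit := List.takeWhile_append_dropWhile (p := fun x => decide (x ≠ '/')) (l := cs.reverse)
      rw [h, List.append_nil] at hsplit
      rw [hsplit, List.reverse_reverse]
      rfl
  | cons c rest => simp

lemma takeWhile_slash (m t : List Char) (h : ∀ c ∈ m, c ≠ '/') :
    (m ++ '/' :: t).takeWhile (· ≠ '/') = m := by
  induction m with
  | nil => simp
  | cons a as ih =>
      simp only [List.cons_append, List.takeWhile_cons]
      rw [if_pos (by simpa using h a (by simp))]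
      rw [ih (fun c hc => h c (by simp [hc]))]

-- takeWhile characterization: for '/'-free m, takeWhile (· ≠ '/') r = m ↔ r = m or r starts with m ++ "/"
lemma takeWhile_eq_iff (r m : List Char) (h2 : ∀ c ∈ m, c ≠ '/') :
    (r.takeWhile (· ≠ '/') = m) ↔ (r = m ∨ m ++ ['/'] <+: r) := by
  constructor
  · intro h
    have hsplit := List.takeWhile_append_dropWhile (p := fun x => decide (x ≠ '/')) (l := r)
    rw [h] at hsplit
    cases hd : r.dropWhile (· ≠ '/') with
    | nil =>
        left
        rw [← hsplit]
        have : r.dropWhile (fun x => decide (x ≠ '/')) = [] := hd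
        rw [this, List.append_nil]
    | cons c rest =>
        right
        have hhead := List.head_dropWhile_not (p := fun x => decide (x ≠ '/')) (l := r)
          (by rw [hd]; simp)
        simp only [hd, List.head_cons] at hhead
        have hc : c = '/' := by simpa using hhead
        refine ⟨rest, ?_⟩
        rw [← hsplit]
        have : r.dropWhile (fun x => decide (x ≠ '/')) = c :: rest := hd
        rw [this, hc]
        simp
  · rintro (rfl | ⟨t, rfl⟩)
    · exact List.takeWhile_eq_self_iff.mpr (by simpa using h2)
    · simpa [List.append_assoc] using takeWhile_slash m t h2

-- per-command: A's equality-or-suffix test matches B's basename equality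
lemma pred_eq (f nc : List Char) (h2 : ∀ c ∈ nc, c ≠ '/') :
    (f = nc ∨ ('/' :: nc) <:+ f) ↔ (f.reverse.takeWhile (· ≠ '/')).reverse = nc := by
  have h2' : ∀ c ∈ nc.reverse, c ≠ '/' := by simpa using h2
  rw [List.reverse_eq_iff, takeWhile_eq_iff _ _ h2']
  refine or_congr ?_ ?_
  · exact ⟨fun h => by rw [h], fun h => by simpa using congrArg List.reverse h⟩
  · rw [show nc.reverse ++ ['/'] = ('/' :: nc).reverse by simp]
    exact (List.reverse_prefix).symm

lemma contains_ofList (l : List String) (b : String) :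
    PySem.Set.contains (PySem.Set.ofList l) b = true ↔ b ∈ l := by
  simp [PySem.Set.contains, PySem.Set.mem_ofList]

set_option maxRecDepth 20000 in
lemma contains_nodeSet (b : String) :
    PySem.Set.contains nodeCommandsSet b = true ↔ b ∈ nodeCommandsA := by
  unfold nodeCommandsSet
  rw [contains_ofList]
  unfold nodeCommandsB nodeCommandsA
  exact Iff.rfl

lemma nodeCommands_ok : ∀ nc ∈ nodeCommandsA, ∀ c ∈ nc.toList, c ≠ '/' := by
  have h : nodeCommandsA.all (fun nc => nc.toList.all (fun c => decide (c ≠ '/'))) = true := by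
    decide
  intro nc hnc c hc
  have h2 := List.all_eq_true.mp h nc hnc
  simpa using List.all_eq_true.mp h2 c hc

-- ===== VERDICT (by name: the statement is the Claim_ definition above) =====
theorem is_node_command_py_spec : Claim_equal_is_node_command_py := by
  intro command _
  unfold Spec_is_node_command_py is_node_command_py is_node_command_py_alt
  cases h : PySem.Str.split₀ command with
  | nil => rfl
  | cons f rest =>
      simp only []
      rw [rsplitSlash1_getLastD, Bool.eq_iff_iff, List.any_eq_true, contains_nodeSet]
      constructor
      · rintro ⟨nc, hmem, hpred⟩
        have h2 := nodeCommands_ok nc hmem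
        have hdisj : f.toList = nc.toList ∨ ('/' :: nc.toList) <:+ f.toList := by
          rcases Bool.or_eq_true_iff.mp hpred with heq | hend
          · left
            have : f = nc := by simpa using heq
            rw [this]
          · right
            have := (PySem.Chars.endswith_iff (s := f.toList) (p := ("/" ++ nc).toList)).mp
              (by simpa using hend)
            simpa using this
        have hbase := (pred_eq f.toList nc.toList h2).mp hdisj
        rw [hbase]
        simpa using hmem
      · intro hmem
        set b := String.ofList ((f.toList.reverse.takeWhile (· ≠ '/')).reverse) with hb
        refine ⟨b, hmem, ?_⟩
        have h2 := nodeCommands_ok b hmem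
        have hbl : (f.toList.reverse.takeWhile (· ≠ '/')).reverse = b.toList := by
          rw [hb]; simp
        have hdisj := (pred_eq f.toList b.toList h2).mpr hbl
        rcases hdisj with heq | hsuf
        · have : f = b := by
            have := congrArg String.ofList heq
            simpa using this
          simp [this]
        · apply Bool.or_eq_true_iff.mpr
          right
          have : ("/" ++ b).toList <:+ f.toList := by simpa using hsuf
          simpa using (PySem.Chars.endswith_iff (s := f.toList) (p := ("/" ++ b).toList)).mpr this
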